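-- pv_equiv track=rewrite | github.com/jaogoy/starrocks | contrib/starrocks-python-client/starrocks/utils.py | strip_identifier_backticks
-- ===== SOURCE A (Python) =====
-- def strip_identifier_backticks(sql_text: str) -> str:
--     """Remove MySQL-style identifier quotes (`) while preserving string literals."""
--     in_quote = False
--     quote_char = None
--     escaped = False
--     out: list[str] = []
--
--     for ch in sql_text:
--         if in_quote:
--             out.append(ch)
--             if escaped:
--                 escaped = False
--             elif ch == "\\":
--                 escaped = True
--             elif ch == quote_char:
--                 in_quote = False
--                 quote_char = None
--             continue
--
--         if ch in ("'", '"'):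
--             in_quote = True
--             quote_char = ch
--             out.append(ch)
--         elif ch == "`":
--             # Drop identifier quote when not in string literal
--             continue
--         else:
--             out.append(ch)
--
--     return "".join(out)
-- ===== SOURCE B (Python) =====
-- def strip_identifier_backticks(sql_text: str) -> str:
--     """Remove MySQL-style identifier quotes (`) while preserving string literals."""
--     out = []
--     i = 0
--     n = len(sql_text)
--     while i < n:
--         ch = sql_text[i]
--         if ch == '`':
--             i += 1
--         elif ch == "'" or ch == '"':
--             # scan forward for the matching closing quote; backslash escapes
--             j = i + 1
--             while j < n:
--                 c = sql_text[j]
--                 if c == '\\':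
--                     j += 2
--                 elif c == ch:
--                     j += 1
--                     break
--                 else:
--                     j += 1
--             out.append(sql_text[i:j])  # whole literal verbatim, backticks included
--             i = j
--         else:
--             out.append(ch)
--             i += 1
--     return "".join(out)
-- ===== Notes on version B (the rewrite author's own statement) =====
-- stated objective: alternative
-- what changed: Replaced A's single per-character pass with a state flag (in_quote/quote_char/escaped) by a two-level scan: an outer index loop that drops backticks and copies ordinary chars, and an inner forward scan that, on seeing a quote, finds the matching closing quote (backslash-aware) and appends the whole literal slice verbatim.
import Mathlib
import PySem

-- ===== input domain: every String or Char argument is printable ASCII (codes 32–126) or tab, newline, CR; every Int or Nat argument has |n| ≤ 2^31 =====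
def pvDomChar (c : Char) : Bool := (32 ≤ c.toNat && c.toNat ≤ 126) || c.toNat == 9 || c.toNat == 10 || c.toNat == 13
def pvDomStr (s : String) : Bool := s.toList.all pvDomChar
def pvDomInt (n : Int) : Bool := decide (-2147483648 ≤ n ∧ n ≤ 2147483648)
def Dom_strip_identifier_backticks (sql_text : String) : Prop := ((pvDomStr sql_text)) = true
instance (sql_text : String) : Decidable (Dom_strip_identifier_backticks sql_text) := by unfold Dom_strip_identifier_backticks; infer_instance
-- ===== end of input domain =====

-- B replaces A's per-character state-flag scan by an two-level scan:
-- the outer pass copies ordinary runs (dropping backticks) and, on a quote, an inner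
-- scan consumes the whole string literal verbatim; objective: alternative decomposition.


-- ===== PORT A =====
-- one step of A's for-loop over state (in_quote, quote_char, escaped, out)
def aStep (st : Bool × Option Char × Bool × List Char) (ch : Char) :
    Bool × Option Char × Bool × List Char :=
  match st with
  | (inq, qc, esc, out) =>
    if inq then
      let out := out ++ [ch]
      if esc then (true, qc, false, out)
      else if ch = '\\' then (true, qc, true, out)
      else if some ch = qc then (false, none, false, out)
      else (true, qc, esc, out)
    else if ch = '\'' ∨ ch = '"' then (true, some ch, false, out ++ [ch])
    else if ch = '`' then (inq, qc, esc, out)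
    else (inq, qc, esc, out ++ [ch])

def strip_identifier_backticks (sql_text : String) : String :=
  String.mk (sql_text.toList.foldl aStep (false, none, false, [])).2.2.2

-- ===== PORT B =====
-- inner scan of B: consume a string literal opened by quote q; returns
-- (the literal's chars after the opening quote, incl. closing quote, the remainder)
def altScan (q : Char) : List Char → List Char × List Char
  | [] => ([], [])
  | c :: rest =>
    if c = '\\' then
      match rest with
      | [] => ([c], [])
      | d :: rest' => (c :: d :: (altScan q rest').1, (altScan q rest').2)
    else if c = q then ([c], rest)
    else (c :: (altScan q rest).1, (altScan q rest).2)

theorem altScan_snd_length (q : Char) (l : List Char) : (altScan q l).2.length ≤ l.length := by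
  fun_induction altScan q l <;> simp_all <;> omega

-- outer pass of B
def altGo : List Char → List Char
  | [] => []
  | c :: rest =>
    if c = '`' then altGo rest
    else if c = '\'' ∨ c = '"' then
      (c :: (altScan c rest).1) ++ altGo (altScan c rest).2
    else c :: altGo rest
termination_by l => l.length
decreasing_by
  all_goals simp
  all_goals (have := altScan_snd_length c rest; omega)

def strip_identifier_backticks_alt (sql_text : String) : String :=
  String.mk (altGo sql_text.toList)

-- ===== PRECONDITION & SPEC =====
def Spec_strip_identifier_backticks (sql_text : String) (out : String) : Prop := out = strip_identifier_backticks_alt sql_text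
instance (sql_text : String) (out : String) : Decidable (Spec_strip_identifier_backticks sql_text out) := by unfold Spec_strip_identifier_backticks; infer_instance

-- ===== CLAIM (what is proved, stated in full; the proofs are below) =====
def Claim_equal_strip_identifier_backticks : Prop := ∀ (sql_text : String), Dom_strip_identifier_backticks sql_text → Spec_strip_identifier_backticks sql_text (strip_identifier_backticks sql_text)

-- ===== LEMMAS AND PROOFS =====
theorem altScan_cons_close (q : Char) (rest : List Char) (h : ¬ q = '\\') :
    altScan q (q :: rest) = ([q], rest) := by
  rw [altScan.eq_def]; simp [h]

theorem altScan_cons_other (q c : Char) (rest : List Char) (h1 : ¬ c = '\\') (h2 : ¬ c = q) :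
    altScan q (c :: rest) = (c :: (altScan q rest).1, (altScan q rest).2) := by
  rw [altScan.eq_def]; simp [h1, h2]

theorem key : ∀ n : Nat,
    (∀ l : List Char, l.length ≤ n → ∀ out,
      (List.foldl aStep (false, none, false, out) l).2.2.2 = out ++ altGo l)
    ∧ (∀ l : List Char, l.length ≤ n → ∀ q out,
      (List.foldl aStep (true, some q, false, out) l).2.2.2
        = out ++ (altScan q l).1 ++ altGo (altScan q l).2) := by
  intro n
  induction n with
  | zero =>
    constructor <;> rintro (_ | ⟨c, rest⟩) hlen <;> simp_all [altGo, altScan]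
  | succ n ih =>
    constructor
    · rintro (_ | ⟨c, rest⟩) hlen out
      · simp [altGo]
      · simp only [List.length_cons, Nat.succ_le_succ_iff] at hlen
        rw [altGo]
        by_cases hq : c = '\'' ∨ c = '"'
        · have hbt : ¬ c = '`' := by rcases hq with h | h <;> simp [h]
          simp [List.foldl_cons, aStep, if_pos hq, if_neg hbt,
            ih.2 rest hlen c (out ++ [c]), List.cons_append]
        · by_cases hbt : c = '`'
          · simp [List.foldl_cons, aStep, if_neg hq, if_pos hbt,
              ih.1 rest hlen out, hbt, if_pos rfl]
          · simp [List.foldl_cons, aStep, if_neg hq, if_neg hbt,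
              ih.1 rest hlen (out ++ [c]), List.append_assoc, List.singleton_append]
    · rintro (_ | ⟨c, rest⟩) hlen q out
      · simp [altScan, altGo]
      · simp only [List.length_cons, Nat.succ_le_succ_iff] at hlen
        by_cases hbs : c = '\\'
        · subst hbs
          cases rest with
          | nil => simp [aStep, altGo, altScan]
          | cons d rest' =>
            have hlen' : rest'.length ≤ n := by
              simp only [List.length_cons] at hlen; omega
            simp [List.foldl_cons, aStep, altScan,
              ih.2 rest' hlen' q (out ++ ['\\', d]), List.append_assoc]
        · by_cases hcq : c = q
          · subst hcq
            simp [List.foldl_cons, aStep, hbs, altScan_cons_close c rest hbs,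
              ih.1 rest hlen (out ++ [c]), List.append_assoc]
          · simp [List.foldl_cons, aStep, hbs, hcq, altScan_cons_other q c rest hbs hcq,
              ih.2 rest hlen q (out ++ [c]), List.append_assoc]

-- ===== VERDICT (by name: the statement is the Claim_ definition above) =====
theorem strip_identifier_backticks_spec : Claim_equal_strip_identifier_backticks := by
  intro s _
  unfold Spec_strip_identifier_backticks strip_identifier_backticks strip_identifier_backticks_alt
  exact congrArg String.mk ((key s.toList.length).1 s.toList (le_refl _) [])
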